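-- pv_equiv track=rewrite | github.com/RedBearAK/PDF-Manipulator | pdf_manipulator/core/page_range/page_range_parser_corrected.py | _has_unquoted_parentheses
-- ===== SOURCE A (Python) =====
-- def _has_unquoted_parentheses(text: str) -> bool:
--     """Check if text contains parentheses outside quoted strings."""
--     in_quote = False
--     quote_char = None
--     i = 0
--
--     while i < len(text):
--         char = text[i]
--
--         if char == '\\' and i + 1 < len(text):
--             i += 2
--             continue
--
--         if char in ['"', "'"] and not in_quote:
--             in_quote = True
--             quote_char = char
--         elif char == quote_char and in_quote:
--             in_quote = False
--             quote_char = None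
--         elif char in ['(', ')'] and not in_quote:
--             return True
--
--         i += 1
--
--     return False
-- ===== SOURCE B (Python) =====
-- def _has_unquoted_parentheses(text: str) -> bool:
--     """Check if text contains parentheses outside quoted strings.
--
--     Two-phase preprocessor: first delete every backslash-escaped pair
--     (a trailing lone backslash stays literal), then delete every quoted
--     span (an unterminated quote swallows to the end of the string), and
--     finally just test the cleaned text for a parenthesis.
--     """
--     # Phase 1: remove escaped pairs.
--     chars = []
--     i = 0
--     n = len(text)
--     while i < n:
--         if text[i] == '\\' and i + 1 < n:
--             i += 2
--         else:
--             chars.append(text[i])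
--             i += 1
--     # Phase 2: remove quoted spans.
--     cleaned = []
--     j = 0
--     m = len(chars)
--     while j < m:
--         c = chars[j]
--         if c in '"\'':
--             k = j + 1
--             while k < m and chars[k] != c:
--                 k += 1
--             j = k + 1
--         else:
--             cleaned.append(c)
--             j += 1
--     return '(' in cleaned or ')' in cleaned
-- ===== Notes on version B (the rewrite author's own statement) =====
-- stated objective: alternative
-- what changed: Replaces A's single-pass in_quote/quote_char state machine with early return by a two-phase preprocessor (strip backslash-escaped pairs, then strip quoted spans including unterminated ones) followed by a plain membership test for a parenthesis character on the cleaned text.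
import Mathlib
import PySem

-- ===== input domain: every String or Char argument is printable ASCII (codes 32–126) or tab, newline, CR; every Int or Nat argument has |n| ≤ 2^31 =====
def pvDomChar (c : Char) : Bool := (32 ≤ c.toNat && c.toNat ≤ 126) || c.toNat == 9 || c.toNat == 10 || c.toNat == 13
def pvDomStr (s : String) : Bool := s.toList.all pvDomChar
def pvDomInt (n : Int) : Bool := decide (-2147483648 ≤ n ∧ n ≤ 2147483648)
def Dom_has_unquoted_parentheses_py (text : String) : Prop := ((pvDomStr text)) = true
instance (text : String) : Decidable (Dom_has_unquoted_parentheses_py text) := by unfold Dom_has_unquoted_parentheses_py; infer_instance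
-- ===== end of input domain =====

-- B replaces A's single-pass quote/escape state machine by a two-phase preprocessor
-- (strip escaped pairs, then strip quoted spans) followed by a plain membership test;
-- objective: alternative structure, same cost. Return values proved equal on all inputs.

-- ===== PORT A =====
-- the while loop of A: state (in_quote, quote_char); i += 2 skips the next char
def pvLoopA (cs : List Char) (inq : Bool) (qc : Option Char) : Bool :=
  match cs with
  | [] => false
  | c :: rest =>
    if c = '\\' ∧ rest ≠ [] then pvLoopA rest.tail inq qc
    else if (c = '"' ∨ c = '\'') ∧ inq = false then pvLoopA rest true (some c)
    else if some c = qc ∧ inq = true then pvLoopA rest false none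
    else if (c = '(' ∨ c = ')') ∧ inq = false then true
    else pvLoopA rest inq qc
termination_by cs.length
decreasing_by
  · cases rest <;> simp_all <;> omega
  · simp
  · simp
  · simp

def has_unquoted_parentheses_py (text : String) : Bool :=
  pvLoopA text.toList false none

-- ===== PORT B =====
-- Phase 1 of Source B: drop every backslash-escaped pair (a trailing lone backslash stays)
def pvStripEsc : List Char → List Char
  | [] => []
  | [c] => [c]
  | c :: c2 :: rest => if c = '\\' then pvStripEsc rest else c :: pvStripEsc (c2 :: rest)

-- the inner scan of phase 2: drop chars up to and including the matching close quote
def pvDropQ (q : Char) : List Char → List Char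
  | [] => []
  | c :: rest => if c = q then rest else pvDropQ q rest

theorem pvDropQ_length_le (q : Char) (cs : List Char) : (pvDropQ q cs).length ≤ cs.length := by
  induction cs with
  | nil => simp [pvDropQ]
  | cons c rest ih => simp only [pvDropQ]; split <;> simp <;> omega

-- Phase 2 of Source B: drop every quoted span
def pvStripQuotes : List Char → List Char
  | [] => []
  | c :: rest =>
    if c = '"' ∨ c = '\'' then pvStripQuotes (pvDropQ c rest)
    else c :: pvStripQuotes rest
termination_by cs => cs.length
decreasing_by
  · exact Nat.lt_succ_of_le (pvDropQ_length_le c rest)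
  · simp

def has_unquoted_parentheses_py_alt (text : String) : Bool :=
  let cleaned := pvStripQuotes (pvStripEsc text.toList)
  cleaned.contains '(' || cleaned.contains ')'

-- ===== PRECONDITION & SPEC =====
def Spec_has_unquoted_parentheses_py (text : String) (out : Bool) : Prop := out = has_unquoted_parentheses_py_alt text
instance (text : String) (out : Bool) : Decidable (Spec_has_unquoted_parentheses_py text out) := by unfold Spec_has_unquoted_parentheses_py; infer_instance

-- ===== CLAIM (what is proved, stated in full; the proofs are below) =====
def Claim_equal_has_unquoted_parentheses_py : Prop := ∀ (text : String), Dom_has_unquoted_parentheses_py text → Spec_has_unquoted_parentheses_py text (has_unquoted_parentheses_py text)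

-- ===== LEMMAS AND PROOFS =====
def pvHasParen (l : List Char) : Bool := l.contains '(' || l.contains ')'

theorem pvStripEsc_cons_ne {c : Char} (rest : List Char) (h : ¬ c = '\\') :
    pvStripEsc (c :: rest) = c :: pvStripEsc rest := by
  cases rest <;> simp [pvStripEsc, h]

theorem pvHasParen_cons_ne {c : Char} (l : List Char) (h : ¬ (c = '(' ∨ c = ')')) :
    pvHasParen (c :: l) = pvHasParen l := by
  have h1 : ¬ ('(' = c) := fun e => h (Or.inl e.symm)
  have h2 : ¬ (')' = c) := fun e => h (Or.inr e.symm)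
  simp [pvHasParen, List.contains_cons, h1, h2]

-- the joint invariant: A's loop in the unquoted state computes B's membership test,
-- and in the quoted state it computes it on the text after the matching close quote
theorem pvMain : ∀ (n : ℕ) (cs : List Char), cs.length ≤ n →
    (pvLoopA cs false none = pvHasParen (pvStripQuotes (pvStripEsc cs))) ∧
    (∀ q : Char, (q = '"' ∨ q = '\'') →
      pvLoopA cs true (some q) = pvHasParen (pvStripQuotes (pvDropQ q (pvStripEsc cs)))) := by
  intro n
  induction n with
  | zero =>
    intro cs hlen
    have : cs = [] := by cases cs <;> simp_all
    subst this
    refine ⟨by simp [pvLoopA, pvStripQuotes, pvStripEsc, pvDropQ, pvHasParen], ?_⟩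
    rintro q (rfl | rfl) <;> simp [pvLoopA, pvStripQuotes, pvStripEsc, pvDropQ, pvHasParen]
  | succ n ih =>
    intro cs hlen
    match cs with
    | [] =>
      refine ⟨by simp [pvLoopA, pvStripQuotes, pvStripEsc, pvDropQ, pvHasParen], ?_⟩
      rintro q (rfl | rfl) <;> simp [pvLoopA, pvStripQuotes, pvStripEsc, pvDropQ, pvHasParen]
    | c :: rest =>
      by_cases hb : c = '\\'
      · subst hb
        match rest with
        | [] =>
          refine ⟨by simp [pvLoopA, pvStripQuotes, pvStripEsc, pvDropQ, pvHasParen], ?_⟩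
          rintro q (rfl | rfl) <;> simp [pvLoopA, pvStripQuotes, pvStripEsc, pvDropQ, pvHasParen]
        | c2 :: rest2 =>
          have hlen2 : rest2.length ≤ n := by simp at hlen; omega
          have heq : pvStripEsc ('\\' :: c2 :: rest2) = pvStripEsc rest2 := by
            simp [pvStripEsc]
          have hA : ∀ inq qc, pvLoopA ('\\' :: c2 :: rest2) inq qc = pvLoopA rest2 inq qc := by
            intro inq qc
            rw [pvLoopA]
            simp
          exact ⟨by rw [hA, heq]; exact (ih rest2 hlen2).1,
                 fun q hq => by rw [hA, heq]; exact (ih rest2 hlen2).2 q hq⟩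
      · have hlen1 : rest.length ≤ n := by simp at hlen; omega
        have hse : pvStripEsc (c :: rest) = c :: pvStripEsc rest := pvStripEsc_cons_ne rest hb
        constructor
        · -- unquoted state
          rw [pvLoopA, hse]
          by_cases hq : c = '"' ∨ c = '\''
          · rw [if_neg (by simp [hb]), if_pos (by simp [hq]), pvStripQuotes, if_pos hq]
            exact (ih rest hlen1).2 c hq
          · rw [if_neg (by simp [hb]), if_neg (by simp [hq]), if_neg (by simp),
                pvStripQuotes, if_neg hq]
            by_cases hp : c = '(' ∨ c = ')'
            · rw [if_pos (by simp [hp])]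
              rcases hp with rfl | rfl <;> simp [pvHasParen, List.contains_cons]
            · rw [if_neg (by simp [hp]), pvHasParen_cons_ne _ hp]
              exact (ih rest hlen1).1
        · -- quoted state with quote_char q
          intro q hq
          rw [pvLoopA, hse]
          rw [if_neg (by simp [hb]), if_neg (by simp)]
          by_cases hc : c = q
          · subst hc
            rw [if_pos (by simp), pvDropQ, if_pos rfl]
            exact (ih rest hlen1).1
          · rw [if_neg (by simp [hc]), if_neg (by simp), pvDropQ, if_neg hc]
            exact (ih rest hlen1).2 q hq

-- ===== VERDICT (by name: the statement is the Claim_ definition above) =====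
theorem has_unquoted_parentheses_py_spec : Claim_equal_has_unquoted_parentheses_py := by
  intro text _
  unfold Spec_has_unquoted_parentheses_py has_unquoted_parentheses_py has_unquoted_parentheses_py_alt
  exact (pvMain text.toList.length text.toList le_rfl).1
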